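-- pv_equiv track=rewrite | github.com/uriberger/reserach_methods_in_software_engineering | code_snippet10.py | long_code_snippet10
-- ===== SOURCE A (Python) =====
-- def long_code_snippet10(row_num, col_num, base):
--     my_array = []
--     for i in range(row_num):
--         my_array.append([])
--         for j in range(col_num):
--             add_val = i*j
--             add_val = add_val**2
--             add_val = add_val % base
--             add_val = add_val * (-1)
--             my_array[-1].append(add_val)
--
--     return my_array
-- ===== SOURCE B (Python) =====
-- def long_code_snippet10(row_num, col_num, base):
--     if col_num <= 0:
--         return [[] for _ in range(row_num)]
--     flat = [-((k // col_num * (k % col_num)) ** 2 % base)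
--             for k in range(row_num * col_num)]
--     return [flat[r * col_num:(r + 1) * col_num] for r in range(row_num)]
-- ===== Notes on version B (the rewrite author's own statement) =====
-- stated objective: alternative
-- what changed: B replaces A's nested row/column loops by a single flat row-major pass over range(row_num*col_num), recovering i and j from the index with // and %, and then a chunking pass that slices the flat list into rows; col_num<=0 is handled up front with empty rows.
import Mathlib
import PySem

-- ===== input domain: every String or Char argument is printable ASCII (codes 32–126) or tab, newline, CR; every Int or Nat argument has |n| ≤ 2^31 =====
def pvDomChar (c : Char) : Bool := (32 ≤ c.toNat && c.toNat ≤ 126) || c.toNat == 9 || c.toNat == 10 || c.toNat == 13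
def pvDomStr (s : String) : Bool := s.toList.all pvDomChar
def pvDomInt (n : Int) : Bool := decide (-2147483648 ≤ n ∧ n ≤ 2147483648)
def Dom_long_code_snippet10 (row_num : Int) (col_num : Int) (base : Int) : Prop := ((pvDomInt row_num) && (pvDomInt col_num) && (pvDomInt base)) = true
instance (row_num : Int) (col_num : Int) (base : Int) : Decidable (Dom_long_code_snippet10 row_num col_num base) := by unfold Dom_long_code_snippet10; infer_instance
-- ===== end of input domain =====

-- B builds the whole matrix as one flat row-major pass over range(row_num*col_num),
-- recovering (i, j) from the index with // and %, then slices the flat list into rows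
-- (alternative decomposition, same asymptotic cost).

-- ===== PORT A =====
def long_code_snippet10 (row_num : Int) (col_num : Int) (base : Int) : List (List Int) :=
  (PySem.List.pyRange 0 row_num 1).foldl (fun my_array i =>
    -- my_array.append([]) then the inner loop appends into the last row
    my_array ++ [(PySem.List.pyRange 0 col_num 1).foldl (fun row j =>
      let add_val := i * j
      let add_val := add_val ^ 2
      let add_val := PySem.Int.mod add_val base
      let add_val := add_val * (-1)
      row ++ [add_val]) []]) []

-- ===== PORT B =====
def long_code_snippet10_alt (row_num : Int) (col_num : Int) (base : Int) : List (List Int) :=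
  if col_num ≤ 0 then
    (PySem.List.pyRange 0 row_num 1).map (fun _ => ([] : List Int))
  else
    let flat := (PySem.List.pyRange 0 (row_num * col_num) 1).map (fun k =>
      -(PySem.Int.mod ((PySem.Int.floordiv k col_num * PySem.Int.mod k col_num) ^ 2) base))
    (PySem.List.pyRange 0 row_num 1).map (fun r =>
      PySem.List.slice flat (some (r * col_num)) (some ((r + 1) * col_num)))

-- ===== PRECONDITION & SPEC =====
-- A (and B) raise ZeroDivisionError exactly when base = 0 and both dimensions are positive.
def Pre_long_code_snippet10 (row_num : Int) (col_num : Int) (base : Int) : Prop :=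
  base ≠ 0 ∨ row_num ≤ 0 ∨ col_num ≤ 0
instance (row_num : Int) (col_num : Int) (base : Int) : Decidable (Pre_long_code_snippet10 row_num col_num base) := by unfold Pre_long_code_snippet10; infer_instance
def pvWitness_long_code_snippet10 : Int × Int × Int := (3, 4, 5)

def Spec_long_code_snippet10 (row_num : Int) (col_num : Int) (base : Int) (out : List (List Int)) : Prop := out = long_code_snippet10_alt row_num col_num base
instance (row_num : Int) (col_num : Int) (base : Int) (out : List (List Int)) : Decidable (Spec_long_code_snippet10 row_num col_num base out) := by unfold Spec_long_code_snippet10; infer_instance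

-- ===== CLAIM =====
def Claim_equal_long_code_snippet10 : Prop := ∀ (row_num : Int) (col_num : Int) (base : Int), Dom_long_code_snippet10 row_num col_num base → Pre_long_code_snippet10 row_num col_num base → Spec_long_code_snippet10 row_num col_num base (long_code_snippet10 row_num col_num base)

-- ===== LEMMAS AND PROOFS =====

-- one row of B's sliced flat list equals A's inner row, for 0 ≤ m < row count
theorem pv_row_eq (c b : Int) (hc : 0 < c) (R : Nat) (m : Nat) (hm : m < R) :
    PySem.List.slice
      ((PySem.List.pyRange 0 ((R : Int) * c) 1).map (fun k =>
        -(PySem.Int.mod ((PySem.Int.floordiv k c * PySem.Int.mod k c) ^ 2) b)))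
      (some ((m : Int) * c)) (some (((m : Int) + 1) * c))
    = (PySem.List.pyRange 0 c 1).map (fun j => -(PySem.Int.mod (((m : Int) * j) ^ 2) b)) := by
  have hct : c = ((c.toNat : Nat) : Int) := (Int.toNat_of_nonneg hc.le).symm
  set ct := c.toNat with hctdef
  have hc0 : 0 < ct := by omega
  rw [hct]
  have h1 : (m : Int) * (ct : Int) = ((m * ct : Nat) : Int) := by push_cast; ring
  have h2 : ((m : Int) + 1) * (ct : Int) = ((m * ct : Nat) : Int) + ((ct : Nat) : Int) := by
    push_cast; ring
  rw [h1, h2, PySem.List.slice_natCast_add]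
  have hRc : (((R : Int) * (ct : Int)) - 0).toNat = R * ct := by
    have : ((R : Int)) * (ct : Int) = ((R * ct : Nat) : Int) := by push_cast; ring
    rw [this]; omega
  rw [PySem.List.pyRange_one, PySem.List.pyRange_one, hRc]
  have hcc : ((ct : Int) - 0).toNat = ct := by omega
  rw [hcc]
  have hlen : (m + 1) * ct ≤ R * ct := Nat.mul_le_mul_right ct (by omega)
  have h3 : (m + 1) * ct = m * ct + ct := Nat.succ_mul m ct
  apply List.ext_getElem
  · simp only [List.length_take, List.length_drop, List.length_map, List.length_range]
    omega
  · intro n h1' h2'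
    have hn : n < ct := by simpa using h2'
    have hidx : m * ct + n < R * ct := by omega
    simp only [List.getElem_take, List.getElem_drop, List.getElem_map, List.getElem_range]
    have hk : (0 : Int) + ((m * ct + n : Nat) : Int) = ((ct * m + n : Nat) : Int) := by
      push_cast; ring
    rw [hk]
    have hdiv : PySem.Int.floordiv ((ct * m + n : Nat) : Int) ((ct : Nat) : Int) = (m : Int) := by
      rw [PySem.Int.floordiv_natCast]
      congr 1
      rw [Nat.mul_add_div hc0, Nat.div_eq_of_lt hn]
      omega
    have hmod : PySem.Int.mod ((ct * m + n : Nat) : Int) ((ct : Nat) : Int) = (n : Int) := by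
      rw [PySem.Int.mod_natCast]
      congr 1
      rw [Nat.mul_add_mod, Nat.mod_eq_of_lt hn]
    rw [hdiv, hmod]
    norm_num

-- ===== VERDICT =====
theorem long_code_snippet10_spec : Claim_equal_long_code_snippet10 := by
  intro r c b _ _
  unfold Spec_long_code_snippet10 long_code_snippet10 long_code_snippet10_alt
  by_cases hc : c ≤ 0
  · rw [if_pos hc, PySem.List.pyRange_one_eq_nil hc]
    simp only [List.foldl_nil]
    rw [PySem.List.foldl_append_singleton_eq_map (fun _ : Int => ([] : List Int))]
    simp
  · rw [if_neg hc]
    have hc2 : 0 < c := by omega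
    rw [PySem.List.foldl_append_singleton_eq_map]
    simp only [List.nil_append]
    apply List.map_congr_left
    intro i hi
    rw [PySem.List.mem_pyRange_one] at hi
    have hr0 : 0 < r := lt_of_le_of_lt hi.1 hi.2
    have hi' : i = ((i.toNat : Nat) : Int) := (Int.toNat_of_nonneg hi.1).symm
    have hr' : r = ((r.toNat : Nat) : Int) := (Int.toNat_of_nonneg hr0.le).symm
    have hm : i.toNat < r.toNat := by omega
    rw [PySem.List.foldl_append_singleton_eq_map
      (fun j => ((PySem.Int.mod ((i * j) ^ 2) b) * (-1)))]
    simp only [List.nil_append]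
    rw [hi', hr']
    rw [pv_row_eq c b hc2 r.toNat i.toNat hm]
    apply List.map_congr_left
    intro j _
    rw [← hi']
    ring_nf
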